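-- pv_equiv track=rewrite | github.com/spartan289/PycharmProjects | learn/number_of_uniquepath.py | noofpath
-- ===== SOURCE A (Python) =====
-- def noofpath(a,b):
--     matrix = [[0 for i in range(b)] for i in range(a)]
--     for i in range(a):
--         matrix[i][0]=1
--     for j in range(b):
--         matrix[0][j]=1
--     for i in range(1,a):
--         for j in range(1,b):
--             matrix[i][j]=matrix[i-1][j]+matrix[i][j-1]
--     return matrix[a-1][b-1]
-- ===== SOURCE B (Python) =====
-- def noofpath(a, b):
--     # number of monotone lattice paths in an a x b grid = C(a+b-2, min(a,b)-1),
--     # computed as an exact integer product in O(min(a,b)) time.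
--     k = min(a, b) - 1
--     n = a + b - 2
--     res = 1
--     for i in range(1, k + 1):
--         res = res * (n - k + i) // i
--     return res
-- ===== Notes on version B (the rewrite author's own statement) =====
-- stated objective: faster
-- what changed: Replaced the O(a*b) dynamic-programming grid with the closed-form binomial coefficient C(a+b-2, min(a,b)-1) computed by an exact integer product of min(a,b)-1 factors.
import Mathlib
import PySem

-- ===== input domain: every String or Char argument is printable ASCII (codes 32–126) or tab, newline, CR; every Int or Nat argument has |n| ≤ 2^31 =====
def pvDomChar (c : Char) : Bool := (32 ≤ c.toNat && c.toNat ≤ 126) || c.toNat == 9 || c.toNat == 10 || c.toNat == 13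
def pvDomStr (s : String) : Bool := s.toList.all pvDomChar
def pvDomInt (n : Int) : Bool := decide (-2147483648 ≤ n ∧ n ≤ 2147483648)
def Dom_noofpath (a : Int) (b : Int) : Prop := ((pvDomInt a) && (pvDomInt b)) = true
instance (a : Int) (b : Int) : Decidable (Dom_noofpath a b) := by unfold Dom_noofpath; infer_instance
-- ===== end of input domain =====

-- B replaces A's O(a*b) DP grid by the closed-form binomial C(a+b-2, min(a,b)-1),
-- computed as an exact integer product (objective: faster, asymptotically).

-- ===== PORT A =====
-- Python 'matrix[i][j] = v': both indices are nonnegative and in range at every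
-- assignment A performs under Pre_, so List.modify/List.set is exact there.
def pySet2 (m : List (List Int)) (i j : Int) (v : Int) : List (List Int) :=
  m.modify i.toNat (fun r => r.set j.toNat v)

def noofpath (a : Int) (b : Int) : Int :=
  let m0 : List (List Int) :=
    (PySem.List.pyRange 0 a 1).map (fun _ => (PySem.List.pyRange 0 b 1).map (fun _ => (0 : Int)))
  let m1 := (PySem.List.pyRange 0 a 1).foldl (fun m i => pySet2 m i 0 1) m0
  let m2 := (PySem.List.pyRange 0 b 1).foldl (fun m j => pySet2 m 0 j 1) m1
  let m3 := (PySem.List.pyRange 1 a 1).foldl (fun m i =>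
      (PySem.List.pyRange 1 b 1).foldl (fun m j =>
        pySet2 m i j
          (PySem.List.pyGetD (PySem.List.pyGetD m (i - 1) []) j 0
            + PySem.List.pyGetD (PySem.List.pyGetD m i []) (j - 1) 0)) m) m2
  PySem.List.pyGetD (PySem.List.pyGetD m3 (a - 1) []) (b - 1) 0

-- ===== PORT B =====
def noofpath_alt (a : Int) (b : Int) : Int :=
  let k := min a b - 1
  let n := a + b - 2
  (PySem.List.pyRange 1 (k + 1) 1).foldl
    (fun res i => PySem.Int.floordiv (res * (n - k + i)) i) 1

-- ===== PRECONDITION & SPEC =====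
-- Pre_ excludes exactly a ≤ 0 or b ≤ 0, where A raises IndexError (empty matrix or empty rows).
def Pre_noofpath (a : Int) (b : Int) : Prop := 1 ≤ a ∧ 1 ≤ b
instance (a : Int) (b : Int) : Decidable (Pre_noofpath a b) := by unfold Pre_noofpath; infer_instance
def pvWitness_noofpath : Int × Int := (3, 4)

def Spec_noofpath (a : Int) (b : Int) (out : Int) : Prop := out = noofpath_alt a b
instance (a : Int) (b : Int) (out : Int) : Decidable (Spec_noofpath a b out) := by unfold Spec_noofpath; infer_instance

-- ===== CLAIM (what is proved, stated in full; the proofs are below) =====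
def Claim_equal_noofpath : Prop := ∀ (a : Int) (b : Int), Dom_noofpath a b → Pre_noofpath a b → Spec_noofpath a b (noofpath a b)

-- ===== LEMMAS AND PROOFS =====

-- The family of partial DP matrices: entry (i,j) is C(i+j, i) where the DP has
-- already written its final value (condition c i j), and 0 elsewhere.
def mkM (p q : Nat) (c : Nat → Nat → Bool) : List (List Int) :=
  (List.range p).map (fun i => (List.range q).map (fun j => if c i j then ((i + j).choose i : Int) else 0))

theorem mkM_congr (p q : Nat) (c c' : Nat → Nat → Bool)
    (h : ∀ x y, x < p → y < q → c x y = c' x y) : mkM p q c = mkM p q c' := by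
  unfold mkM
  apply List.map_congr_left
  intro i hi
  apply List.map_congr_left
  intro j hj
  rw [h i j (List.mem_range.mp hi) (List.mem_range.mp hj)]

theorem mkM_read (p q : Nat) (c : Nat → Nat → Bool) (x y : Nat) (hx : x < p) (hy : y < q) :
    PySem.List.pyGetD (PySem.List.pyGetD (mkM p q c) (x : Int) []) (y : Int) 0
      = if c x y then ((x + y).choose x : Int) else 0 := by
  rw [PySem.List.pyGetD_natCast, PySem.List.pyGetD_natCast]
  simp [mkM, List.getD_eq_getElem?_getD, hx, hy]

theorem mkM_set (p q : Nat) (c c' : Nat → Nat → Bool) (i j : Nat) (v : Int)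
    (hi : i < p) (_hj : j < q)
    (hv : v = if c' i j then ((i + j).choose i : Int) else 0)
    (hc : ∀ x y, x < p → y < q → ¬(x = i ∧ y = j) → c x y = c' x y) :
    (mkM p q c).modify i (fun r => r.set j v) = mkM p q c' := by
  apply List.ext_getElem
  · simp [mkM]
  · intro n h1 h2
    rw [List.getElem_modify]
    have hn : n < p := by simpa [mkM] using h2
    by_cases hni : i = n
    · subst hni
      simp only [mkM, List.getElem_map, List.getElem_range, if_true]
      apply List.ext_getElem
      · simp
      · intro m hm1 hm2
        have hmq : m < q := by simpa using hm2
        rw [List.getElem_set]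
        by_cases hmj : j = m
        · subst hmj
          simp [hv]
        · simp only [if_neg hmj, List.getElem_map, List.getElem_range]
          rw [hc i m hi hmq (by tauto)]
    · simp only [mkM, List.getElem_map, List.getElem_range]
      rw [if_neg hni]
      apply List.map_congr_left
      intro m hm
      rw [hc n m hn (List.mem_range.mp hm) (by tauto)]

theorem fold_col (p q : Nat) (hq : 1 ≤ q) (n : Nat) (hn : n ≤ p) :
    (List.range n).foldl (fun m k => pySet2 m ((k : Nat) : Int) 0 1) (mkM p q (fun _ _ => false))
      = mkM p q (fun i j => decide (i < n ∧ j = 0)) := by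
  induction n with
  | zero =>
    simp only [List.range_zero, List.foldl_nil]
    apply mkM_congr
    intro x y _ _
    simp
  | succ n ih =>
    rw [List.range_succ, List.foldl_append, ih (by omega)]
    simp only [List.foldl_cons, List.foldl_nil]
    unfold pySet2
    simp only [Int.toNat_natCast, Int.toNat_zero]
    apply mkM_set p q _ _ n 0 1 (by omega) (by omega)
    · simp
    · intro x y _ _ hne
      rw [decide_eq_decide]
      omega

theorem fold_row (p q : Nat) (hp : 1 ≤ p) (n : Nat) (hn : n ≤ q) :
    (List.range n).foldl (fun m k => pySet2 m 0 ((k : Nat) : Int) 1)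
        (mkM p q (fun _i j => decide (j = 0)))
      = mkM p q (fun i j => decide (j = 0 ∨ (i = 0 ∧ j < n))) := by
  induction n with
  | zero =>
    simp only [List.range_zero, List.foldl_nil]
    apply mkM_congr
    intro x y _ _
    rw [decide_eq_decide]
    omega
  | succ n ih =>
    rw [List.range_succ, List.foldl_append, ih (by omega)]
    simp only [List.foldl_cons, List.foldl_nil]
    unfold pySet2
    simp only [Int.toNat_natCast, Int.toNat_zero]
    apply mkM_set p q _ _ 0 n 1 (by omega) (by omega)
    · simp
    · intro x y _ _ hne
      rw [decide_eq_decide]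
      omega

theorem fold_inner (p q i : Nat) (hi1 : 1 ≤ i) (hip : i < p) (t : Nat) (ht : t ≤ q - 1) (hq : 1 ≤ q) :
    (List.range t).foldl (fun (m : List (List Int)) (k : Nat) =>
        pySet2 m (i : Int) (1 + (k : Int))
          (PySem.List.pyGetD (PySem.List.pyGetD m ((i : Int) - 1) []) (1 + (k : Int)) 0
            + PySem.List.pyGetD (PySem.List.pyGetD m (i : Int) []) ((1 + (k : Int)) - 1) 0))
        (mkM p q (fun x y => decide (x < i ∨ y = 0)))
      = mkM p q (fun x y => decide (x < i ∨ y = 0 ∨ (x = i ∧ y ≤ t))) := by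
  induction t with
  | zero =>
    simp only [List.range_zero, List.foldl_nil]
    apply mkM_congr
    intro x y _ _
    rw [decide_eq_decide]
    omega
  | succ t ih =>
    rw [List.range_succ, List.foldl_append, ih (by omega)]
    simp only [List.foldl_cons, List.foldl_nil]
    have e1 : (i : Int) - 1 = ((i - 1 : Nat) : Int) := by omega
    have e2 : (1 : Int) + (t : Int) = ((t + 1 : Nat) : Int) := by omega
    have e3 : (1 : Int) + (t : Int) - 1 = ((t : Nat) : Int) := by omega
    rw [e3, e2, e1]
    rw [mkM_read p q _ (i - 1) (t + 1) (by omega) (by omega)]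
    rw [mkM_read p q _ i t (by omega) (by omega)]
    have hc1 : (decide (i - 1 < i ∨ t + 1 = 0 ∨ (i - 1 = i ∧ t + 1 ≤ t))) = true := by
      rw [decide_eq_true_eq]; omega
    have hc2 : (decide (i < i ∨ t = 0 ∨ (i = i ∧ t ≤ t))) = true := by
      rw [decide_eq_true_eq]; omega
    rw [hc1, hc2]
    simp only [if_true]
    unfold pySet2
    simp only [Int.toNat_natCast]
    apply mkM_set p q _ _ i (t + 1) _ (by omega) (by omega)
    · have hc3 : (decide (i < i ∨ t + 1 = 0 ∨ (i = i ∧ t + 1 ≤ t + 1))) = true := by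
        rw [decide_eq_true_eq]; omega
      rw [hc3, if_pos rfl]
      obtain ⟨i', rfl⟩ : ∃ i', i = i' + 1 := ⟨i - 1, by omega⟩
      have e4 : i' + 1 - 1 = i' := by omega
      rw [e4]
      have e5 : i' + (t + 1) = i' + t + 1 := by omega
      have e6 : i' + 1 + t = i' + t + 1 := by omega
      have e7 : i' + 1 + (t + 1) = (i' + t + 1) + 1 := by omega
      rw [e5, e6, e7, Nat.choose_succ_succ (i' + t + 1) i']
      push_cast
      ring
    · intro x y _ _ hne
      rw [decide_eq_decide]
      omega

theorem fold_outer (p q : Nat) (hp : 1 ≤ p) (hq : 1 ≤ q) (s : Nat) (hs : s ≤ p - 1) :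
    (List.range s).foldl (fun (m : List (List Int)) (k : Nat) =>
        (PySem.List.pyRange 1 (q : Int) 1).foldl (fun m j =>
          pySet2 m (1 + (k : Int)) j
            (PySem.List.pyGetD (PySem.List.pyGetD m ((1 + (k : Int)) - 1) []) j 0
              + PySem.List.pyGetD (PySem.List.pyGetD m (1 + (k : Int)) []) (j - 1) 0)) m)
        (mkM p q (fun i j => decide (i < 1 ∨ j = 0)))
      = mkM p q (fun i j => decide (i < s + 1 ∨ j = 0)) := by
  induction s with
  | zero =>
    simp only [List.range_zero, List.foldl_nil]
  | succ s ih =>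
    rw [List.range_succ, List.foldl_append, ih (by omega)]
    simp only [List.foldl_cons, List.foldl_nil]
    rw [PySem.List.pyRange_one 1 (q : Int)]
    rw [List.foldl_map]
    have eq1 : ((q : Int) - 1).toNat = q - 1 := by omega
    rw [eq1]
    have eq2 : (1 : Int) + (s : Int) = ((s + 1 : Nat) : Int) := by omega
    rw [eq2]
    have hstart : mkM p q (fun i j => decide (i < s + 1 ∨ j = 0))
        = mkM p q (fun x y => decide (x < s + 1 ∨ y = 0)) := rfl
    rw [hstart, fold_inner p q (s + 1) (by omega) (by omega) (q - 1) (by omega) hq]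
    apply mkM_congr
    intro x y _ hy
    rw [decide_eq_decide]
    omega

theorem noofpath_closed (p q : Nat) (hp : 1 ≤ p) (hq : 1 ≤ q) :
    noofpath (p : Int) (q : Int) = (((p - 1) + (q - 1)).choose (p - 1) : Int) := by
  simp only [noofpath]
  have hm0 : ((PySem.List.pyRange 0 (p : Int) 1).map
      (fun _ => (PySem.List.pyRange 0 (q : Int) 1).map (fun _ => (0 : Int))))
      = mkM p q (fun _ _ => false) := by
    simp [mkM, PySem.List.pyRange_zero_natCast, List.map_map, Function.comp_def,
      List.map_const', List.length_range]
  rw [hm0]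
  rw [PySem.List.pyRange_zero_natCast p, List.foldl_map]
  rw [fold_col p q hq p le_rfl]
  rw [mkM_congr p q _ (fun i j => decide (j = 0)) (by intro x y hx hy; rw [decide_eq_decide]; omega)]
  rw [PySem.List.pyRange_zero_natCast q, List.foldl_map]
  rw [fold_row p q hp q le_rfl]
  rw [mkM_congr p q _ (fun i j => decide (i < 1 ∨ j = 0)) (by intro x y hx hy; rw [decide_eq_decide]; omega)]
  rw [PySem.List.pyRange_one 1 (p : Int), List.foldl_map]
  have eqp : ((p : Int) - 1).toNat = p - 1 := by omega
  rw [eqp]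
  rw [fold_outer p q hp hq (p - 1) le_rfl]
  rw [mkM_congr p q _ (fun _ _ => true) (by intro x y hx hy; simp; omega)]
  have ep : (p : Int) - 1 = ((p - 1 : Nat) : Int) := by omega
  have eq' : (q : Int) - 1 = ((q - 1 : Nat) : Int) := by omega
  rw [ep, eq', mkM_read p q _ (p - 1) (q - 1) (by omega) (by omega)]
  simp

theorem alt_fold (M : Nat) (t : Nat) :
    (List.range t).foldl (fun (res : Int) (k : Nat) =>
        PySem.Int.floordiv (res * ((M : Int) + (1 + (k : Int)))) (1 + (k : Int))) 1
      = ((M + t).choose t : Int) := by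
  induction t with
  | zero => simp
  | succ t ih =>
    rw [List.range_succ, List.foldl_append, ih]
    simp only [List.foldl_cons, List.foldl_nil]
    have h1 : (M : Int) + (1 + (t : Int)) = ((M + t + 1 : Nat) : Int) := by omega
    have h2 : (1 : Int) + (t : Int) = ((t + 1 : Nat) : Int) := by omega
    rw [h1, h2, ← Int.natCast_mul, PySem.Int.floordiv_natCast]
    have h3 : (M + t).choose t * (M + t + 1) / (t + 1) = (M + t + 1).choose (t + 1) := by
      have h4 := Nat.add_one_mul_choose_eq (M + t) t
      rw [Nat.mul_comm, h4, Nat.mul_div_cancel _ (by omega)]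
    rw [h3]
    have h5 : M + (t + 1) = M + t + 1 := by omega
    rw [h5]

theorem alt_closed (p q : Nat) (hp : 1 ≤ p) (hq : 1 ≤ q) :
    noofpath_alt (p : Int) (q : Int) = (((p + q - 2)).choose (min p q - 1) : Int) := by
  simp only [noofpath_alt]
  rw [PySem.List.pyRange_one 1 (min (p : Int) (q : Int) - 1 + 1), List.foldl_map]
  have e1 : (min (p : Int) (q : Int) - 1 + 1 - 1).toNat = min p q - 1 := by omega
  rw [e1]
  have e2 : (p : Int) + (q : Int) - 2 - (min (p : Int) (q : Int) - 1)
      = ((max p q - 1 : Nat) : Int) := by omega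
  rw [e2]
  rw [alt_fold (max p q - 1) (min p q - 1)]
  have e3 : max p q - 1 + (min p q - 1) = p + q - 2 := by omega
  rw [e3]

-- ===== VERDICT (by name: the statement is the Claim_ definition above) =====
theorem noofpath_spec : Claim_equal_noofpath := by
  intro a b _ hpre
  obtain ⟨ha, hb⟩ := hpre
  unfold Spec_noofpath
  obtain ⟨p, rfl⟩ : ∃ p : Nat, a = (p : Int) := ⟨a.toNat, (Int.toNat_of_nonneg (by omega)).symm⟩
  obtain ⟨q, rfl⟩ : ∃ q : Nat, b = (q : Int) := ⟨b.toNat, (Int.toNat_of_nonneg (by omega)).symm⟩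
  have hp : 1 ≤ p := by exact_mod_cast ha
  have hq : 1 ≤ q := by exact_mod_cast hb
  rw [noofpath_closed p q hp hq, alt_closed p q hp hq]
  congr 1
  have h2 : (p - 1) + (q - 1) = p + q - 2 := by omega
  rw [h2]
  rcases Nat.le_total p q with h | h
  · have : min p q - 1 = p - 1 := by omega
    rw [this]
  · have hmin : min p q - 1 = q - 1 := by omega
    have h3 : p - 1 = (p + q - 2) - (q - 1) := by omega
    rw [hmin, h3, Nat.choose_symm (by omega)]
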